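-- pv_equiv track=rewrite | github.com/bleong314/skittle_sorter | src/internal/src/game/chineseCheckersBoard.py | valid_move_string
-- ===== SOURCE A (Python) =====
-- from typing import List, Tuple, Set
--
-- def valid_move_string(moves: List[str]) -> bool:
--     """
--     Checks if the list of moves is valid
--     Every move has to be in the list of all possible player moves
--     If there is a standard move, there can only be one standard move
--     If there is a jump, every move has to be a jump
--     """
--
--     # List of single player moves
--     basic_moves = ["UL", "UR", "R", "DR", "DL", "L"]
--     jump_moves = ["JUL", "JUR", "JR", "JDR", "JDL", "JL"]
--     swap_moves = ["SUL", "SUR", "SR", "SDR", "SDL", "SL"]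
--
--     basic_exists = False
--     jump_count = 0
--     swap_exists = False
--
--     # Checks if all of the moves are even in the list of moves
--     for move in moves:
--         move = move.upper()
--         if move in basic_moves:
--             basic_exists = True
--         elif move in jump_moves:
--             jump_count += 1
--         elif move in swap_moves:
--             swap_exists = True
--         else:
--             return False
--
--     # If there is a basic move, ensure that the movelist is only that move
--     if basic_exists and len(moves) != 1:
--         return False
--
--     # If there is a jump move, ensure that all moves are jump moves
--     if jump_count != 0 and jump_count != len(moves):
--         return False
--
--     if swap_exists and len(moves) != 1:
--         return False
--
--     return True
-- ===== SOURCE B (Python) =====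
-- def valid_move_string(moves):
--     """
--     Checks if the list of moves is valid (see A's docstring).
--     Strategy: uppercase and validate each move first (early False on the
--     first invalid one), then apply the single length-keyed rule: with two
--     or more moves every move must be a jump; with zero or one move any
--     valid move list is fine.
--     """
--     jump_moves = ("JUL", "JUR", "JR", "JDR", "JDL", "JL")
--     all_moves = ("UL", "UR", "R", "DR", "DL", "L") + jump_moves + \
--                 ("SUL", "SUR", "SR", "SDR", "SDL", "SL")
--
--     ups = []
--     for move in moves:
--         u = move.upper()
--         if u not in all_moves:
--             return False
--         ups.append(u)
--
--     if len(moves) >= 2: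
--         return all(u in jump_moves for u in ups)
--     return True
-- ===== Notes on version B (the rewrite author's own statement) =====
-- stated objective: simpler
-- what changed: Replaces A's three category flags, jump counter and three post-loop checks with a validate-and-collect pass followed by one length-keyed rule: lists of length >= 2 must be all jumps, shorter valid lists are always accepted.
import Mathlib
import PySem

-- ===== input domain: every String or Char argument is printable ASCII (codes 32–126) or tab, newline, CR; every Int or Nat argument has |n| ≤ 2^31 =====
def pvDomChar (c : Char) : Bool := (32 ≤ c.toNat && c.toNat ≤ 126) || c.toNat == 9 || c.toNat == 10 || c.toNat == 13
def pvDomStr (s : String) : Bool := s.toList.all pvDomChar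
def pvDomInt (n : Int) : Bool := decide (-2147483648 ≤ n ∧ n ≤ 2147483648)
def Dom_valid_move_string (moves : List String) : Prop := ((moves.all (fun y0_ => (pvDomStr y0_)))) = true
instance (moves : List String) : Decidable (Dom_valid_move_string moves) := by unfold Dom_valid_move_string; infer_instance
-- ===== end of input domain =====

-- B replaces A's three category flags, jump counter and three post-loop checks with a
-- validate-and-collect pass plus one length-keyed rule (simpler; same O(n) cost).

-- ===== PORT A =====
def pvBasicA : List String := ["UL", "UR", "R", "DR", "DL", "L"]
def pvJumpA : List String := ["JUL", "JUR", "JR", "JDR", "JDL", "JL"]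
def pvSwapA : List String := ["SUL", "SUR", "SR", "SDR", "SDL", "SL"]

-- the for-loop (with its early `return False`) and A's three post-loop checks;
-- n is len(moves), taken once before the loop
def pvGoA (n : Int) : List String → Bool → Int → Bool → Bool
  | [], basicExists, jumpCount, swapExists =>
      if basicExists = true ∧ n ≠ 1 then false
      else if jumpCount ≠ 0 ∧ jumpCount ≠ n then false
      else if swapExists = true ∧ n ≠ 1 then false
      else true
  | move :: rest, basicExists, jumpCount, swapExists =>
      let m := PySem.Str.upper move
      if m ∈ pvBasicA then pvGoA n rest true jumpCount swapExists
      else if m ∈ pvJumpA then pvGoA n rest basicExists (jumpCount + 1) swapExists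
      else if m ∈ pvSwapA then pvGoA n rest basicExists jumpCount true
      else false

def valid_move_string (moves : List String) : Bool :=
  pvGoA (moves.length : Int) moves false 0 false

-- ===== PORT B =====
def pvJumpB : List String := ["JUL", "JUR", "JR", "JDR", "JDL", "JL"]
def pvAllB : List String :=
  ["UL", "UR", "R", "DR", "DL", "L"] ++ pvJumpB ++ ["SUL", "SUR", "SR", "SDR", "SDL", "SL"]

-- the collect loop: uppercases every move, `none` on the first invalid one
def pvCollectB : List String → Option (List String)
  | [] => some []
  | move :: rest =>
      let u := PySem.Str.upper move
      if u ∈ pvAllB then (pvCollectB rest).map (fun ups => u :: ups) else none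

def valid_move_string_alt (moves : List String) : Bool :=
  match pvCollectB moves with
  | none => false
  | some ups =>
      if 2 ≤ moves.length then ups.all (fun u => decide (u ∈ pvJumpB)) else true

-- ===== PRECONDITION & SPEC =====
def Spec_valid_move_string (moves : List String) (out : Bool) : Prop := out = valid_move_string_alt moves
instance (moves : List String) (out : Bool) : Decidable (Spec_valid_move_string moves out) := by unfold Spec_valid_move_string; infer_instance

-- ===== CLAIM (what is proved, stated in full; the proofs are below) =====
def Claim_equal_valid_move_string : Prop := ∀ (moves : List String), Dom_valid_move_string moves → Spec_valid_move_string moves (valid_move_string moves)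

-- ===== LEMMAS AND PROOFS =====

lemma pvAllB_mem (u : String) :
    u ∈ pvAllB ↔ u ∈ pvBasicA ∨ u ∈ pvJumpA ∨ u ∈ pvSwapA := by
  simp only [pvAllB, pvBasicA, pvJumpA, pvJumpB, pvSwapA, List.mem_append]
  tauto

lemma pv_basic_not_jump (u : String) (h : u ∈ pvBasicA) : u ∉ pvJumpA := by
  fin_cases h <;> decide

lemma pv_basic_not_swap (u : String) (h : u ∈ pvBasicA) : u ∉ pvSwapA := by
  fin_cases h <;> decide

lemma pv_jump_not_swap (u : String) (h : u ∈ pvJumpA) : u ∉ pvSwapA := by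
  fin_cases h <;> decide

lemma pv_swap_not_jump (u : String) (h : u ∈ pvSwapA) : u ∉ pvJumpA := by
  intro hj; exact pv_jump_not_swap u hj h

lemma pvCollectB_length (moves ups : List String) (h : pvCollectB moves = some ups) :
    ups.length = moves.length := by
  induction moves generalizing ups with
  | nil => simp [pvCollectB] at h; subst h; rfl
  | cons m rest ih =>
      simp only [pvCollectB] at h
      split at h
      · cases hr : pvCollectB rest with
        | none => rw [hr] at h; simp at h
        | some ups' =>
            rw [hr] at h; simp at h; subst h
            simp [ih ups' hr]
      · simp at h

lemma pvCollectB_mem_valid (moves ups : List String) (h : pvCollectB moves = some ups) :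
    ∀ u ∈ ups, u ∈ pvAllB := by
  induction moves generalizing ups with
  | nil => simp [pvCollectB] at h; subst h; simp
  | cons m rest ih =>
      simp only [pvCollectB] at h
      split at h
      · cases hr : pvCollectB rest with
        | none => rw [hr] at h; simp at h
        | some ups' =>
            rw [hr] at h; simp at h; subst h
            intro u hu
            rcases List.mem_cons.mp hu with rfl | hu
            · assumption
            · exact ih ups' hr u hu
      · simp at h

lemma pvGoA_nil (n : Int) (b : Bool) (j : Int) (s : Bool) :
    pvGoA n [] b j s =
      if b = true ∧ n ≠ 1 then false
      else if j ≠ 0 ∧ j ≠ n then false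
      else if s = true ∧ n ≠ 1 then false
      else true := rfl

-- characterize A's loop state at the end of the loop by what B's collect pass produces
lemma pvGoA_collect (rest : List String) (n : Int) (b : Bool) (j : Int) (s : Bool) :
    pvGoA n rest b j s =
      match pvCollectB rest with
      | none => false
      | some ups =>
          pvGoA n [] (b || ups.any (fun u => decide (u ∈ pvBasicA)))
            (j + (ups.countP (fun u => decide (u ∈ pvJumpA)) : Int))
            (s || ups.any (fun u => decide (u ∈ pvSwapA))) := by
  induction rest generalizing b j s with
  | nil => simp [pvCollectB]
  | cons m rest ih =>
      simp only [pvGoA, pvCollectB]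
      by_cases hb : PySem.Str.upper m ∈ pvBasicA
      · rw [if_pos hb, if_pos (pvAllB_mem _ |>.mpr (Or.inl hb)), ih]
        cases hr : pvCollectB rest with
        | none => rfl
        | some ups =>
            simp only [Option.map_some, List.any_cons, List.countP_cons,
              decide_eq_true hb, decide_eq_false (pv_basic_not_jump _ hb),
              decide_eq_false (pv_basic_not_swap _ hb), Bool.true_or, Bool.or_true,
              Bool.false_or]
            rw [pvGoA_nil]
            simp
      · rw [if_neg hb]
        by_cases hj : PySem.Str.upper m ∈ pvJumpA
        · rw [if_pos hj, if_pos (pvAllB_mem _ |>.mpr (Or.inr (Or.inl hj))), ih]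
          cases hr : pvCollectB rest with
          | none => rfl
          | some ups =>
              simp only [Option.map_some, List.any_cons, List.countP_cons,
                decide_eq_true hj, decide_eq_false hb,
                decide_eq_false (pv_jump_not_swap _ hj), Bool.false_or, if_true]
              rw [show ((List.countP (fun u => decide (u ∈ pvJumpA)) ups + 1 : Nat) : Int)
                    = (List.countP (fun u => decide (u ∈ pvJumpA)) ups : Int) + 1 by push_cast; ring,
                  show j + 1 + (List.countP (fun u => decide (u ∈ pvJumpA)) ups : Int)
                    = j + ((List.countP (fun u => decide (u ∈ pvJumpA)) ups : Int) + 1) by ring,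
                  pvGoA_nil]
        · rw [if_neg hj]
          by_cases hs : PySem.Str.upper m ∈ pvSwapA
          · rw [if_pos hs, if_pos (pvAllB_mem _ |>.mpr (Or.inr (Or.inr hs))), ih]
            cases hr : pvCollectB rest with
            | none => rfl
            | some ups =>
                simp only [Option.map_some, List.any_cons, List.countP_cons,
                  decide_eq_true hs, decide_eq_false hb,
                  decide_eq_false (pv_swap_not_jump _ hs), Bool.false_or, Bool.true_or,
                  Bool.or_true]
                rw [pvGoA_nil]
                simp
          · rw [if_neg hs, if_neg (fun hA => by
              rcases (pvAllB_mem _).mp hA with h | h | h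
              exacts [hb h, hj h, hs h])]

-- A's post-loop checks, fed the totals of a fully valid move list, reduce to B's rule
lemma pv_final (ups : List String)
    (hv : ∀ u ∈ ups, u ∈ pvBasicA ∨ u ∈ pvJumpA ∨ u ∈ pvSwapA) :
    pvGoA (ups.length : Int) [] (ups.any (fun u => decide (u ∈ pvBasicA)))
        ((ups.countP (fun u => decide (u ∈ pvJumpA)) : Int))
        (ups.any (fun u => decide (u ∈ pvSwapA)))
      = (if 2 ≤ ups.length then ups.all (fun u => decide (u ∈ pvJumpA)) else true) := by
  match ups with
  | [] => decide
  | [u] =>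
      rw [pvGoA_nil]
      by_cases hj : u ∈ pvJumpA
      · simp [hj]
      · simp [hj]
  | u1 :: u2 :: rest =>
      have hlen : 2 ≤ (u1 :: u2 :: rest).length := by simp
      have hn1 : ((u1 :: u2 :: rest).length : Int) ≠ 1 := by simp; omega
      rw [if_pos hlen, pvGoA_nil]
      by_cases hAll : ∀ x ∈ u1 :: u2 :: rest, x ∈ pvJumpA
      · -- every move is a jump: count = length, no basic and no swap: both sides true
        have hb : (u1 :: u2 :: rest).any (fun u => decide (u ∈ pvBasicA)) = false :=
          List.any_eq_false.mpr (fun x hx => by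
            have : x ∉ pvBasicA := fun h => pv_basic_not_jump x h (hAll x hx)
            simp [this])
        have hs : (u1 :: u2 :: rest).any (fun u => decide (u ∈ pvSwapA)) = false :=
          List.any_eq_false.mpr (fun x hx => by simp [pv_jump_not_swap x (hAll x hx)])
        have hcnt : (u1 :: u2 :: rest).countP (fun u => decide (u ∈ pvJumpA))
            = (u1 :: u2 :: rest).length :=
          List.countP_eq_length.mpr (fun x hx => decide_eq_true (hAll x hx))
        rw [List.all_eq_true.mpr (fun x hx => decide_eq_true (hAll x hx))]
        simp [hb, hs, hcnt]
      · -- some move is not a jump: B says false; A fails at one of its three checks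
        rw [List.all_eq_false.mpr (by
          simp only [not_forall, exists_prop] at hAll
          obtain ⟨x, hx, hxj⟩ := hAll
          exact ⟨x, hx, by simp [hxj]⟩)]
        by_cases hb : (u1 :: u2 :: rest).any (fun u => decide (u ∈ pvBasicA)) = true
        · rw [if_pos ⟨hb, hn1⟩]
        · -- no basic, so the non-jump move is a swap move
          have hs : (u1 :: u2 :: rest).any (fun u => decide (u ∈ pvSwapA)) = true := by
            simp only [not_forall, exists_prop] at hAll
            obtain ⟨x, hx, hxj⟩ := hAll
            refine List.any_eq_true.mpr ⟨x, hx, ?_⟩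
            rcases hv x hx with h | h | h
            · exact absurd (List.any_eq_true.mpr ⟨x, hx, decide_eq_true h⟩) hb
            · exact absurd h hxj
            · exact decide_eq_true h
          rw [if_neg (by simp [hb])]
          split_ifs with h1 h2
          · rfl
          · rfl
          · exact absurd ⟨hs, hn1⟩ h2

-- ===== VERDICT (by name: the statement is the Claim_ definition above) =====
theorem valid_move_string_spec : Claim_equal_valid_move_string := by
  intro moves _
  unfold Spec_valid_move_string valid_move_string valid_move_string_alt
  rw [pvGoA_collect]
  cases hc : pvCollectB moves with
  | none => rfl
  | some ups =>
      have hlen := pvCollectB_length moves ups hc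
      have hv : ∀ u ∈ ups, u ∈ pvBasicA ∨ u ∈ pvJumpA ∨ u ∈ pvSwapA := fun u hu =>
        (pvAllB_mem u).mp (pvCollectB_mem_valid moves ups hc u hu)
      have hJ : pvJumpB = pvJumpA := rfl
      simp only [hJ, ← hlen, Bool.false_or, zero_add]
      exact pv_final ups hv
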